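-- pv_equiv track=rewrite | github.com/alacrity2001/PTSA-public- | ptsa/ptsa/utils/metrics.py | range_convers
-- ===== SOURCE A (Python) =====
-- def range_convers(label):
--     '''
--     input: arrays of binary values
--     output: list of ordered pair [[a0,b0], [a1,b1]... ] of the inputs
--     '''
--     L = []
--     i = 0
--     j = 0
--     while j < len(label):
--         while label[i] != 1:
--             i+=1
--             if i >= len(label):
--                 break
--         j = i+1
--         if j >= len(label):
--             L.append((i,j-1))
--
--             break
--         while label[j] != 0:
--             j+=1
--             if j >= len(label):
--                 L.append((i,j-1))
--                 break
--         if j >= len(label):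
--             break
--         L.append((i, j-1))
--         i = j
--     return L[:-1]
-- ===== SOURCE B (Python) =====
-- def range_convers(label):
--     L = []
--     in_run = False
--     start = 0
--     for k, v in enumerate(label):
--         if not in_run:
--             if v == 1:
--                 in_run = True
--                 start = k
--         elif v == 0:
--             L.append((start, k - 1))
--             in_run = False
--     return L
-- ===== Notes on version B (the rewrite author's own statement) =====
-- stated objective: simpler
-- what changed: Replaced A's nested while-loops with two cursors, a sentinel append and a final L[:-1] by a single flat enumerate pass with an explicit (in_run, start) state that appends each closed run directly and drops runs still open at the end.
import Mathlib
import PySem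

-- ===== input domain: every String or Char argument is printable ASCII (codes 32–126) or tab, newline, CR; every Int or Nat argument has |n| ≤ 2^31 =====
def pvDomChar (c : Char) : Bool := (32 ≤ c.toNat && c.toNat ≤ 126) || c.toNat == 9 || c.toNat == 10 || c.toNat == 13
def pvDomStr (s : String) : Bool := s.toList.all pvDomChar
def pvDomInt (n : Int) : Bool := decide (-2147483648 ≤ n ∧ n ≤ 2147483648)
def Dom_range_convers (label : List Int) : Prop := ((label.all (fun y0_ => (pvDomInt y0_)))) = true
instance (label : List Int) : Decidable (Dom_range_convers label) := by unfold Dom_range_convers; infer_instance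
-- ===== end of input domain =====

-- B replaces A's nested while-loops with three pointers by a single flat pass keeping an
-- explicit (in_run, start) state; same return value, no speed claim (objective: simpler).

-- ===== PORT A =====
-- inner loop `while label[i] != 1: i += 1; if i >= len(label): break`
def rcLoopI (label : List Int) (i : Nat) : Nat :=
  if h : i < label.length then
    if label[i] ≠ 1 then
      if i + 1 ≥ label.length then i + 1 else rcLoopI label (i + 1)
    else i
  else i
termination_by label.length - i

-- inner loop `while label[j] != 0: j += 1; if j >= len(label): break`
def rcLoopJ (label : List Int) (j : Nat) : Nat :=
  if h : j < label.length then
    if label[j] ≠ 0 then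
      if j + 1 ≥ label.length then j + 1 else rcLoopJ label (j + 1)
    else j
  else j
termination_by label.length - j

theorem rcLoopI_ge (label : List Int) (i : Nat) : i ≤ rcLoopI label i := by
  unfold rcLoopI
  split
  · split
    · split
      · omega
      · have := rcLoopI_ge label (i + 1); omega
    · omega
  · omega
termination_by label.length - i

theorem rcLoopJ_ge (label : List Int) (j : Nat) : j ≤ rcLoopJ label j := by
  unfold rcLoopJ
  split
  · split
    · split
      · omega
      · have := rcLoopJ_ge label (j + 1); omega
    · omega
  · omega
termination_by label.length - j

-- outer `while j < len(label)` body (entered with the current i; L is the accumulator;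
-- the Python locals i (after the first inner loop) and j (after the second) are the
-- rcLoopI / rcLoopJ values, written inline)
def rcOuter (label : List Int) (i : Nat) (L : List (Int × Int)) : List (Int × Int) :=
  if rcLoopI label i + 1 ≥ label.length then
    L ++ [((rcLoopI label i : Int), ((rcLoopI label i + 1 : Nat) : Int) - 1)]
  else if rcLoopJ label (rcLoopI label i + 1) ≥ label.length then
    L ++ [((rcLoopI label i : Int), ((rcLoopJ label (rcLoopI label i + 1) : Nat) : Int) - 1)]
  else
    rcOuter label (rcLoopJ label (rcLoopI label i + 1))
      (L ++ [((rcLoopI label i : Int), ((rcLoopJ label (rcLoopI label i + 1) : Nat) : Int) - 1)])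
termination_by label.length - i
decreasing_by
  have h1 := rcLoopI_ge label i
  have h2 := rcLoopJ_ge label (rcLoopI label i + 1)
  omega

def range_convers (label : List Int) : List (Int × Int) :=
  let L := if 0 < label.length then rcOuter label 0 [] else []
  L.dropLast   -- L[:-1] (= PySem.List.slice_to_neg_one)

-- ===== PORT B =====
-- one flat pass with state (L, in_run, start) over enumerate(label)
def range_convers_alt (label : List Int) : List (Int × Int) :=
  ((PySem.List.enumerate label 0).foldl
    (fun (st : List (Int × Int) × Bool × Int) (kv : Int × Int) =>
      let (L, in_run, start) := st
      let (k, v) := kv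
      if !in_run then
        if v = 1 then (L, true, k) else st
      else if v = 0 then (L ++ [(start, k - 1)], false, start)
      else st)
    ([], false, 0)).1

-- ===== PRECONDITION & SPEC =====
def Spec_range_convers (label : List Int) (out : List (Int × Int)) : Prop := out = range_convers_alt label
instance (label : List Int) (out : List (Int × Int)) : Decidable (Spec_range_convers label out) := by unfold Spec_range_convers; infer_instance

-- ===== CLAIM (what is proved, stated in full; the proofs are below) =====
def Claim_equal_range_convers : Prop := ∀ (label : List Int), Dom_range_convers label → Spec_range_convers label (range_convers label)

-- ===== LEMMAS AND PROOFS =====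

-- direct recursion computing B's output from position k with state (in_run, start)
def rcMach (label : List Int) (k : Nat) (inRun : Bool) (start : Int) : List (Int × Int) :=
  if h : k < label.length then
    if !inRun then
      if label[k] = 1 then rcMach label (k + 1) true (k : Int) else rcMach label (k + 1) inRun start
    else if label[k] = 0 then (start, (k : Int) - 1) :: rcMach label (k + 1) false start
    else rcMach label (k + 1) inRun start
  else []
termination_by label.length - k

-- equation lemmas for the loops and the machine
theorem rcLoopI_stop (label : List Int) (i : Nat) (h : ¬ i < label.length) :
    rcLoopI label i = i := by rw [rcLoopI]; simp [h]

theorem rcLoopI_hit (label : List Int) (i : Nat) (h : i < label.length) (h1 : label[i] = 1) :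
    rcLoopI label i = i := by rw [rcLoopI]; simp [h, h1]

theorem rcLoopI_step (label : List Int) (i : Nat) (h : i < label.length) (h1 : label[i] ≠ 1) :
    rcLoopI label i = if i + 1 ≥ label.length then i + 1 else rcLoopI label (i + 1) := by
  rw [rcLoopI]; simp [h, h1]

theorem rcLoopJ_stop (label : List Int) (j : Nat) (h : ¬ j < label.length) :
    rcLoopJ label j = j := by rw [rcLoopJ]; simp [h]

theorem rcLoopJ_hit (label : List Int) (j : Nat) (h : j < label.length) (h1 : label[j] = 0) :
    rcLoopJ label j = j := by rw [rcLoopJ]; simp [h, h1]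

theorem rcLoopJ_step (label : List Int) (j : Nat) (h : j < label.length) (h1 : label[j] ≠ 0) :
    rcLoopJ label j = if j + 1 ≥ label.length then j + 1 else rcLoopJ label (j + 1) := by
  rw [rcLoopJ]; simp [h, h1]

theorem rcMach_stop (label : List Int) (k : Nat) (b : Bool) (s : Int) (h : ¬ k < label.length) :
    rcMach label k b s = [] := by rw [rcMach]; simp [h]

theorem rcMach_start (label : List Int) (k : Nat) (s : Int) (h : k < label.length)
    (h1 : label[k] = 1) : rcMach label k false s = rcMach label (k + 1) true (k : Int) := by
  rw [rcMach]; simp [h, h1]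

theorem rcMach_skip0 (label : List Int) (k : Nat) (s : Int) (h : k < label.length)
    (h1 : label[k] ≠ 1) : rcMach label k false s = rcMach label (k + 1) false s := by
  rw [rcMach]; simp [h, h1]

theorem rcMach_emit (label : List Int) (k : Nat) (s : Int) (h : k < label.length)
    (h1 : label[k] = 0) :
    rcMach label k true s = (s, (k : Int) - 1) :: rcMach label (k + 1) false s := by
  rw [rcMach]; simp [h, h1]

theorem rcMach_skip1 (label : List Int) (k : Nat) (s : Int) (h : k < label.length)
    (h1 : label[k] ≠ 0) : rcMach label k true s = rcMach label (k + 1) true s := by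
  rw [rcMach]; simp [h, h1]

theorem rcMach_start_irrel (label : List Int) (k : Nat) (s t : Int) :
    rcMach label k false s = rcMach label k false t := by
  by_cases h : k < label.length
  · by_cases h1 : label[k] = 1
    · rw [rcMach_start label k s h h1, rcMach_start label k t h h1]
    · rw [rcMach_skip0 label k s h h1, rcMach_skip0 label k t h h1]
      exact rcMach_start_irrel label (k + 1) s t
  · rw [rcMach_stop label k false s h, rcMach_stop label k false t h]
termination_by label.length - k

-- B's foldl over the enumerate-suffix starting at index k equals accumulator ++ rcMach
theorem alt_fold_eq_mach (label rest : List Int) (k : Nat) (hk : rest = label.drop k)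
    (L : List (Int × Int)) (inRun : Bool) (start : Int) :
    ((PySem.List.enumerate rest (k : Int)).foldl
      (fun (st : List (Int × Int) × Bool × Int) (kv : Int × Int) =>
        if !st.2.1 then
          if kv.2 = 1 then (st.1, true, kv.1) else st
        else if kv.2 = 0 then (st.1 ++ [(st.2.2, kv.1 - 1)], false, st.2.2)
        else st)
      (L, inRun, start)).1 = L ++ rcMach label k inRun start := by
  induction rest generalizing k L inRun start with
  | nil =>
    have hlen : label.length ≤ k := by
      by_contra h
      have : label.drop k ≠ [] := by simp [List.drop_eq_nil_iff]; omega
      exact this hk.symm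
    rw [rcMach_stop label k inRun start (by omega)]
    simp [PySem.List.enumerate]
  | cons x xs ih =>
    have hklt : k < label.length := by
      by_contra h
      rw [List.drop_eq_nil_of_le (by omega)] at hk
      exact List.cons_ne_nil x xs hk
    have hsplit : label[k] :: label.drop (k + 1) = x :: xs := by
      rw [List.getElem_cons_drop, ← hk]
    have hx : label[k] = x := by injection hsplit
    have hxs : xs = label.drop (k + 1) := by injection hsplit with _ h2; exact h2.symm
    rw [PySem.List.enumerate_cons, List.foldl_cons]
    dsimp only
    have hcast : ((k : Int) + 1) = ((k + 1 : Nat) : Int) := by push_cast; ring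
    by_cases hr : inRun
    · subst hr
      by_cases hv : x = 0
      · rw [rcMach_emit label k start hklt (hx.trans hv)]
        simp only [hv, Bool.not_true, Bool.false_eq_true, if_false, if_true]
        rw [hcast, ih (k + 1) hxs (L ++ [(start, (k : Int) - 1)]) false start]
        simp
      · rw [rcMach_skip1 label k start hklt (by rw [hx]; exact hv)]
        simp only [Bool.not_true, Bool.false_eq_true, if_false, if_neg hv]
        rw [hcast, ih (k + 1) hxs L true start]
    · simp only [Bool.not_eq_true] at hr; subst hr
      by_cases hv : x = 1
      · rw [rcMach_start label k start hklt (hx.trans hv)]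
        simp only [hv, Bool.not_false, if_true]
        rw [hcast, ih (k + 1) hxs L true (k : Int)]
      · rw [rcMach_skip0 label k start hklt (by rw [hx]; exact hv)]
        simp only [Bool.not_false, if_true, if_neg hv]
        rw [hcast, ih (k + 1) hxs L false start]

-- rcOuter accumulates on the left
theorem rcOuter_acc (label : List Int) (i : Nat) (L : List (Int × Int)) :
    rcOuter label i L = L ++ rcOuter label i [] := by
  rw [rcOuter]
  conv_rhs => rw [rcOuter]
  split
  · simp
  · split
    · simp
    · rw [rcOuter_acc label _ (L ++ _), rcOuter_acc label _ ([] ++ _)]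
      simp
termination_by label.length - i
decreasing_by
  all_goals
    have h1 := rcLoopI_ge label i
    have h2 := rcLoopJ_ge label (rcLoopI label i + 1)
    omega

theorem rcOuter_ne_nil (label : List Int) (i : Nat) : rcOuter label i [] ≠ [] := by
  rw [rcOuter]
  split
  · simp
  · split
    · simp
    · rw [rcOuter_acc]
      simp

theorem rcLoopI_one (label : List Int) (i : Nat) (h : rcLoopI label i < label.length) :
    label[rcLoopI label i] = 1 := by
  by_cases hi : i < label.length
  · by_cases h1 : label[i] = 1
    · simp only [rcLoopI_hit label i hi h1] at h ⊢; exact h1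
    · simp only [rcLoopI_step label i hi h1] at h ⊢
      by_cases h2 : i + 1 ≥ label.length
      · simp only [if_pos h2] at h; omega
      · simp only [if_neg h2] at h ⊢
        exact rcLoopI_one label (i + 1) h
  · rw [rcLoopI_stop label i hi] at h; omega
termination_by label.length - i

theorem rcLoopJ_zero (label : List Int) (j : Nat) (h : rcLoopJ label j < label.length) :
    label[rcLoopJ label j] = 0 := by
  by_cases hj : j < label.length
  · by_cases h1 : label[j] = 0
    · simp only [rcLoopJ_hit label j hj h1] at h ⊢; exact h1
    · simp only [rcLoopJ_step label j hj h1] at h ⊢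
      by_cases h2 : j + 1 ≥ label.length
      · simp only [if_pos h2] at h; omega
      · simp only [if_neg h2] at h ⊢
        exact rcLoopJ_zero label (j + 1) h
  · rw [rcLoopJ_stop label j hj] at h; omega
termination_by label.length - j

-- skipping non-1 entries leaves rcMach (not in a run) unchanged, following rcLoopI
theorem mach_loopI (label : List Int) (i : Nat) (s : Int) :
    rcMach label i false s = rcMach label (rcLoopI label i) false s := by
  by_cases hi : i < label.length
  · by_cases h1 : label[i] = 1
    · rw [rcLoopI_hit label i hi h1]
    · rw [rcLoopI_step label i hi h1, rcMach_skip0 label i s hi h1]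
      by_cases h2 : i + 1 ≥ label.length
      · rw [if_pos h2]
      · rw [if_neg h2]
        exact mach_loopI label (i + 1) s
  · rw [rcLoopI_stop label i hi]
termination_by label.length - i

-- skipping non-0 entries leaves rcMach (in a run) unchanged, following rcLoopJ
theorem mach_loopJ (label : List Int) (j : Nat) (s : Int) :
    rcMach label j true s = rcMach label (rcLoopJ label j) true s := by
  by_cases hj : j < label.length
  · by_cases h1 : label[j] = 0
    · rw [rcLoopJ_hit label j hj h1]
    · rw [rcLoopJ_step label j hj h1, rcMach_skip1 label j s hj h1]
      by_cases h2 : j + 1 ≥ label.length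
      · rw [if_pos h2]
      · rw [if_neg h2]
        exact mach_loopJ label (j + 1) s
  · rw [rcLoopJ_stop label j hj]
termination_by label.length - j

-- main invariant: dropping the final (sentinel / open-run) tuple of A's outer loop
-- from position i yields exactly B's machine from position i (not in a run)
theorem main_inv (label : List Int) (i : Nat) (s : Int) :
    (rcOuter label i []).dropLast = rcMach label i false s := by
  rw [rcOuter, mach_loopI label i s]
  by_cases hA : rcLoopI label i + 1 ≥ label.length
  · rw [if_pos hA]
    by_cases hlt : rcLoopI label i < label.length
    · rw [rcMach_start label _ s hlt (rcLoopI_one label i hlt),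
        rcMach_stop label _ true _ (by omega)]
      simp
    · rw [rcMach_stop label _ false s hlt]; simp
  · rw [if_neg hA]
    have hilt : rcLoopI label i < label.length := by omega
    rw [rcMach_start label _ s hilt (rcLoopI_one label i hilt),
      mach_loopJ label (rcLoopI label i + 1) ((rcLoopI label i : Nat) : Int)]
    by_cases hB : rcLoopJ label (rcLoopI label i + 1) ≥ label.length
    · rw [if_pos hB, rcMach_stop label _ true _ (by omega)]
      simp
    · rw [if_neg hB]
      have hjlt : rcLoopJ label (rcLoopI label i + 1) < label.length := by omega
      have hj0 := rcLoopJ_zero label (rcLoopI label i + 1) hjlt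
      rw [rcMach_emit label _ _ hjlt hj0, rcOuter_acc,
        List.dropLast_append_of_ne_nil (rcOuter_ne_nil label _)]
      have hrec := main_inv label (rcLoopJ label (rcLoopI label i + 1)) ((rcLoopI label i : Nat) : Int)
      rw [rcMach_skip0 label _ _ hjlt (by rw [hj0]; norm_num)] at hrec
      rw [hrec]
      simp
termination_by label.length - i
decreasing_by
  have h1 := rcLoopI_ge label i
  have h2 := rcLoopJ_ge label (rcLoopI label i + 1)
  omega

theorem alt_eq_mach (label : List Int) : range_convers_alt label = rcMach label 0 false 0 := by
  have h := alt_fold_eq_mach label label 0 (by simp) [] false 0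
  simp only [List.nil_append] at h
  exact h

-- ===== VERDICT (by name: the statement is the Claim_ definition above) =====
theorem range_convers_spec : Claim_equal_range_convers := by
  intro label _
  unfold Spec_range_convers range_convers
  rw [alt_eq_mach]
  split
  · exact main_inv label 0 0
  · rename_i h
    rw [rcMach_stop label 0 false 0 (by omega)]
    simp
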